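-- pv_equiv track=rewrite | github.com/Confirm-Solutions/confirmasaurus | confirm/confirm/mini_imprint/checkpoint.py | exponential_delete
-- ===== SOURCE A (Python) =====
-- def exponential_delete(i, base=10):
--     delete = []
--     for j in range(i):
--         power = 0
--         keep = False
--         while base**power < i:
--             if j % base**power == 0 and j >= i - base ** (power + 1):
--                 keep = True
--                 break
--             power += 1
--         if not keep:
--             delete.append(j)
--     return delete
-- ===== SOURCE B (Python) =====
-- def exponential_delete(i, base=10):
--     kept = set()
--     power = 0
--     while base ** power < i:
--         m = abs(base ** power)
--         lo = max(0, i - base ** (power + 1))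
--         start = -(-lo // m) * m  # first multiple of m at or above lo
--         kept.update(range(start, i, m))
--         power += 1
--     return [j for j in range(i) if j not in kept]
-- ===== Notes on version B (the rewrite author's own statement) =====
-- stated objective: alternative
-- what changed: Instead of testing every j in range(i) against all powers with an inner while loop, B walks the power levels once, collects the kept indices (the multiples of base**power inside the retained window) into a set, and returns range(i) minus that set; Pre_ excludes base in {-1,0,1} with i >= 2, where A raises ZeroDivisionError or loops forever.
import Mathlib
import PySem

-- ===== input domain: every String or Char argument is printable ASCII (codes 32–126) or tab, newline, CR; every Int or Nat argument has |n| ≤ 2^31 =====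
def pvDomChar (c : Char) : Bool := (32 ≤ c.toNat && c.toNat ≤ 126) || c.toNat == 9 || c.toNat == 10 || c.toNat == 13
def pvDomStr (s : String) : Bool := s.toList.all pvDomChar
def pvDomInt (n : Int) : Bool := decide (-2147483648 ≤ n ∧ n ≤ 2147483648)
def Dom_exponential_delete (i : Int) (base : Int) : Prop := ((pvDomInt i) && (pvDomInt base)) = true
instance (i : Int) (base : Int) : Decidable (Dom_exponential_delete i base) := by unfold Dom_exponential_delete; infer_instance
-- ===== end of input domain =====

-- B enumerates the kept indices per power level into a set and lists the complement,
-- instead of testing every index against all powers.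
-- Fuel note: both while loops are ported with fuel 64; on Dom (|i| ≤ 2^31) with
-- Pre_ (i ≤ 1 or |base| ≥ 2) they always exit within 34 iterations, so each port
-- computes exactly what its Python computes on every admitted input.

-- ===== PORT A =====
def expdelGoA (i base j : Int) : Nat → Nat → Bool
  | _, 0 => false
  | power, fuel+1 =>
    if base ^ power < i then
      if PySem.Int.mod j (base ^ power) = 0 ∧ i - base ^ (power + 1) ≤ j then true
      else expdelGoA i base j (power + 1) fuel
    else false

def exponential_delete (i : Int) (base : Int) : List Int :=
  (PySem.List.pyRange 0 i 1).foldl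
    (fun delete j => if !(expdelGoA i base j 0 64) then delete ++ [j] else delete) []

-- ===== PORT B =====
-- start of the body at one power level: first multiple of m at or above lo
def expdelStart (i base : Int) (power : Nat) : Int :=
  let m := |base ^ power|
  let lo := max 0 (i - base ^ (power + 1))
  let start := -(PySem.Int.floordiv (-lo) m) * m
  start

def expdelKept (i base : Int) : Nat → Nat → PySem.Set Int → PySem.Set Int
  | 0, _, kept => kept
  | fuel+1, power, kept =>
    if base ^ power < i then
      expdelKept i base fuel (power + 1)
        (PySem.Set.update kept
          (PySem.List.pyRange (expdelStart i base power) i |base ^ power|))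
    else kept

def exponential_delete_alt (i : Int) (base : Int) : List Int :=
  let kept := expdelKept i base 64 0 PySem.Set.empty
  (PySem.List.pyRange 0 i 1).filter (fun j => !(PySem.Set.contains kept j))

-- ===== PRECONDITION & SPEC =====
-- Pre_ excludes base ∈ {-1, 0, 1} when i ≥ 2, where A never returns: it loops
-- forever (base = 1 or -1) or raises ZeroDivisionError at j % base**power (base = 0).
def Pre_exponential_delete (i : Int) (base : Int) : Prop :=
  i ≤ 1 ∨ base ≤ -2 ∨ 2 ≤ base
instance (i : Int) (base : Int) : Decidable (Pre_exponential_delete i base) := by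
  unfold Pre_exponential_delete; infer_instance

def pvWitness_exponential_delete : Int × Int := (10, 10)

def Spec_exponential_delete (i : Int) (base : Int) (out : List Int) : Prop := out = exponential_delete_alt i base
instance (i : Int) (base : Int) (out : List Int) : Decidable (Spec_exponential_delete i base out) := by unfold Spec_exponential_delete; infer_instance

-- ===== CLAIM (what is proved, stated in full; the proofs are below) =====
def Claim_equal_exponential_delete : Prop := ∀ (i : Int) (base : Int), Dom_exponential_delete i base → Pre_exponential_delete i base → Spec_exponential_delete i base (exponential_delete i base)

-- ===== LEMMAS AND PROOFS =====

-- exact semantics of A's inner while loop, any fuel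
lemma expdelGoA_iff (i base j : Int) :
    ∀ (fuel power : Nat),
      (expdelGoA i base j power fuel = true ↔
        ∃ k, k < fuel ∧ (∀ l, l ≤ k → base ^ (power + l) < i) ∧
          PySem.Int.mod j (base ^ (power + k)) = 0 ∧ i - base ^ (power + k + 1) ≤ j) := by
  intro fuel
  induction fuel with
  | zero => intro power; simp [expdelGoA]
  | succ n ih =>
    intro power
    by_cases hg : base ^ power < i
    · by_cases hc : PySem.Int.mod j (base ^ power) = 0 ∧ i - base ^ (power + 1) ≤ j
      · simp only [expdelGoA, if_pos hg, if_pos hc]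
        constructor
        · intro _
          exact ⟨0, Nat.succ_pos n,
            fun l hl => by rw [Nat.le_zero.mp hl]; simpa using hg,
            by simpa using hc.1, by simpa using hc.2⟩
        · intro _; trivial
      · simp only [expdelGoA, if_pos hg, if_neg hc]
        rw [ih (power + 1)]
        constructor
        · rintro ⟨k, hk, hall, hmod, hwin⟩
          refine ⟨k + 1, by omega, ?_, ?_, ?_⟩
          · intro l hl
            cases l with
            | zero => simpa using hg
            | succ l' =>
              have h := hall l' (by omega)
              have he : power + (l' + 1) = power + 1 + l' := by omega
              rwa [he]
          · have he : power + (k + 1) = power + 1 + k := by omega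
            rwa [he]
          · have he : power + (k + 1) + 1 = power + 1 + k + 1 := by omega
            rwa [he]
        · rintro ⟨k, hk, hall, hmod, hwin⟩
          cases k with
          | zero => exact absurd ⟨by simpa using hmod, by simpa using hwin⟩ hc
          | succ k' =>
            refine ⟨k', by omega, ?_, ?_, ?_⟩
            · intro l hl
              have h := hall (l + 1) (by omega)
              have he : power + (l + 1) = power + 1 + l := by omega
              rwa [he] at h
            · have he : power + (k' + 1) = power + 1 + k' := by omega
              rwa [he] at hmod
            · have he : power + (k' + 1) + 1 = power + 1 + k' + 1 := by omega
              rwa [he] at hwin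
    · simp only [expdelGoA, if_neg hg]
      constructor
      · intro h; cases h
      · rintro ⟨k, hk, hall, _⟩
        exact absurd (by simpa using hall 0 (Nat.zero_le _)) hg

-- exact semantics of B's per-power loop, any fuel
lemma expdelKept_mem (i base x : Int) :
    ∀ (fuel power : Nat) (kept : PySem.Set Int),
      (x ∈ expdelKept i base fuel power kept ↔
        x ∈ kept ∨ ∃ k, k < fuel ∧ (∀ l, l ≤ k → base ^ (power + l) < i) ∧
          x ∈ PySem.List.pyRange (expdelStart i base (power + k)) i |base ^ (power + k)|) := by
  intro fuel
  induction fuel with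
  | zero => intro power kept; simp [expdelKept]
  | succ n ih =>
    intro power kept
    by_cases hg : base ^ power < i
    · simp only [expdelKept, if_pos hg]
      rw [ih (power + 1), PySem.Set.mem_update]
      constructor
      · rintro ((h | h) | ⟨k, hk, hall, hmem⟩)
        · exact Or.inl h
        · exact Or.inr ⟨0, Nat.succ_pos n,
            fun l hl => by rw [Nat.le_zero.mp hl]; simpa using hg, by simpa using h⟩
        · refine Or.inr ⟨k + 1, by omega, ?_, ?_⟩
          · intro l hl
            cases l with
            | zero => simpa using hg
            | succ l' =>
              have h := hall l' (by omega)
              have he : power + (l' + 1) = power + 1 + l' := by omega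
              rwa [he]
          · have he : power + (k + 1) = power + 1 + k := by omega
            rwa [he]
      · rintro (h | ⟨k, hk, hall, hmem⟩)
        · exact Or.inl (Or.inl h)
        · cases k with
          | zero => exact Or.inl (Or.inr (by simpa using hmem))
          | succ k' =>
            refine Or.inr ⟨k', by omega, ?_, ?_⟩
            · intro l hl
              have h := hall (l + 1) (by omega)
              have he : power + (l + 1) = power + 1 + l := by omega
              rwa [he] at h
            · have he : power + (k' + 1) = power + 1 + k' := by omega
              rwa [he] at hmem
    · simp only [expdelKept, if_neg hg]
      constructor
      · exact Or.inl
      · rintro (h | ⟨k, hk, hall, _⟩)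
        · exact h
        · exact absurd (by simpa using hall 0 (Nat.zero_le _)) hg

-- one band of B holds exactly the indices A's test at that power keeps
lemma expdel_band_mem (i base x : Int) (p : Nat) (hb : base ≠ 0)
    (hx0 : 0 ≤ x) (hxi : x < i) :
    (x ∈ PySem.List.pyRange (expdelStart i base p) i |base ^ p| ↔
      PySem.Int.mod x (base ^ p) = 0 ∧ i - base ^ (p + 1) ≤ x) := by
  have hm0 : (0 : Int) < |base ^ p| := abs_pos.mpr (pow_ne_zero p hb)
  set m : Int := |base ^ p| with hmdef
  set lo : Int := max 0 (i - base ^ (p + 1)) with hlodef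
  set q : Int := -(PySem.Int.floordiv (-lo) m) with hqdef
  have hstart : expdelStart i base p = q * m := by
    rw [hqdef, hlodef, hmdef]; rfl
  have hq := (PySem.Int.neg_floordiv_neg_eq_iff_of_pos (a := lo) hm0).mp hqdef.symm
  rw [hstart, PySem.List.mem_pyRange_iff_of_pos hm0, PySem.Int.mod_eq_zero_iff_dvd]
  have hdvd : base ^ p ∣ x ↔ m ∣ x := (abs_dvd _ _).symm
  constructor
  · rintro ⟨hge, _, hd⟩
    have hmx : m ∣ x := by
      have h := dvd_add hd (dvd_mul_left m q)
      simpa using h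
    refine ⟨hdvd.mpr hmx, ?_⟩
    have : lo ≤ x := le_trans hq.2 hge
    omega
  · rintro ⟨hd, hwin⟩
    have hmx : m ∣ x := hdvd.mp hd
    have hlox : lo ≤ x := by omega
    refine ⟨?_, hxi, dvd_sub hmx (dvd_mul_left m q)⟩
    -- x is a multiple of m with (q-1)*m < lo ≤ x, hence q*m ≤ x
    obtain ⟨c, hc⟩ := hmx
    have h1 : (q - 1) * m < m * c := by rw [← hc]; exact lt_of_lt_of_le hq.1 hlox
    have hqc : q ≤ c := by nlinarith
    calc q * m ≤ c * m := by nlinarith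
    _ = x := by rw [hc]; ring

-- the bridge: A's inner loop keeps x iff x lands in B's kept set
lemma expdel_bridge (i base x : Int) (hb : base ≠ 0) (hx0 : 0 ≤ x) (hxi : x < i) :
    (expdelGoA i base x 0 64 = true ↔
      x ∈ expdelKept i base 64 0 PySem.Set.empty) := by
  rw [expdelGoA_iff, expdelKept_mem]
  simp only [Nat.zero_add, PySem.Set.empty, List.not_mem_nil, false_or]
  constructor
  · rintro ⟨k, hk, hall, hmod, hwin⟩
    exact ⟨k, hk, hall, (expdel_band_mem i base x k hb hx0 hxi).mpr ⟨hmod, hwin⟩⟩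
  · rintro ⟨k, hk, hall, hmem⟩
    have h := (expdel_band_mem i base x k hb hx0 hxi).mp hmem
    exact ⟨k, hk, hall, h.1, h.2⟩

-- ===== VERDICT (by name: the statement is the Claim_ definition above) =====
theorem exponential_delete_spec : Claim_equal_exponential_delete := by
  intro i base _ hpre
  unfold Spec_exponential_delete exponential_delete exponential_delete_alt
  rw [PySem.List.foldl_append_if_eq_filter (fun j => !(expdelGoA i base j 0 64))]
  simp only [List.nil_append]
  by_cases hb : base = 0
  · -- with base = 0, Pre_ forces i ≤ 1: both guards 1 < i fail at power 0
    have hi1 : i ≤ 1 := by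
      rcases hpre with h | h | h
      · exact h
      · omega
      · omega
    subst hb
    by_cases hi0 : i ≤ 0
    · rw [PySem.List.pyRange_one_eq_nil hi0]
      simp
    · have : i = 1 := by omega
      subst this
      decide
  · apply List.filter_congr
    intro x hx
    rw [PySem.List.mem_pyRange_one] at hx
    have h := expdel_bridge i base x hb hx.1 hx.2
    cases hA : expdelGoA i base x 0 64 with
    | true =>
      have hc : (expdelKept i base 64 0 PySem.Set.empty).contains x = true :=
        (PySem.Set.contains_iff _ _).mpr (h.mp hA)
      simp only [hc]
    | false =>
      have hc : (expdelKept i base 64 0 PySem.Set.empty).contains x = false := by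
        rw [Bool.eq_false_iff]
        intro hcon
        rw [h.mpr ((PySem.Set.contains_iff _ _).mp hcon)] at hA
        cases hA
      simp only [hc]
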